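-- pv_equiv track=rewrite | github.com/OscarNaslundCuesta/miscellaneous-scripts | fra_knäck1_2023.py | translate_letters_to_digits
-- ===== SOURCE A (Python) =====
-- def translate_letters_to_digits(input_string, translation_dict):
--     output = ""
--     for char in input_string:
--         if char.isalpha():
--             if char in translation_dict:
--                 output += str(translation_dict[char])
--             else:
--                 output += char
--         else:
--             output += char
--     return output
-- ===== SOURCE B (Python) =====
-- def translate_letters_to_digits(input_string, translation_dict):
--     table = {ord(k): str(v) for k, v in translation_dict.items()
--              if isinstance(k, str) and len(k) == 1 and k.isalpha()}
--     return input_string.translate(table)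
-- ===== Notes on version B (the rewrite author's own statement) =====
-- stated objective: idiomatic
-- what changed: Precomputes a translation table of single-char alpha keys once and applies it with str.translate, instead of an explicit per-character loop with nested if/else and a dict probe per character.
import Mathlib
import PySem

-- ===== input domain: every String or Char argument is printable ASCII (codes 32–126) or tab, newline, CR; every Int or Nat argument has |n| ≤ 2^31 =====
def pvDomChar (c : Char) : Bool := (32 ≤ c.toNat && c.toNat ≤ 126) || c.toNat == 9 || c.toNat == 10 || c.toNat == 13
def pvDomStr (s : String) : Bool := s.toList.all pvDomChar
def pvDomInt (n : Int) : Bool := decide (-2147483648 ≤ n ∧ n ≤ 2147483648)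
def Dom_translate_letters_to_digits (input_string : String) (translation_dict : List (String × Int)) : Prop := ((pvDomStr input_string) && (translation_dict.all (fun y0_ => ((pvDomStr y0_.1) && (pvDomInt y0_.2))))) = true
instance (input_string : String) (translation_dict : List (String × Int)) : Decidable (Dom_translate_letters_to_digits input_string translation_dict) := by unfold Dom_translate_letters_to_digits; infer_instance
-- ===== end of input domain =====

-- B precomputes a translation table (single-char alpha keys → str(value)) once and maps it
-- over the string, instead of A's per-character loop with nested if/else and a dict probe
-- per character. Objective: idiomatic (str.translate style).

-- ===== PORT A =====
-- per-character body of A's loop: if char.isalpha(): (dict probe, first match) else char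
def pvAStep (translation_dict : List (String × Int)) (c : Char) : List Char :=
  if PySem.Chars.isalpha c then
    match translation_dict.find? (fun kv => kv.1 == String.ofList [c]) with
    | some kv => (PySem.Int.toStr kv.2).toList
    | none => [c]
  else [c]

def translate_letters_to_digits (input_string : String) (translation_dict : List (String × Int)) : String :=
  String.ofList (input_string.toList.foldl (fun output c => output ++ pvAStep translation_dict c) [])

-- ===== PORT B =====
-- the translation table: keep only single-character alphabetic keys, value = str(v)
def pvBTable (translation_dict : List (String × Int)) : List (Char × List Char) :=
  translation_dict.filterMap (fun kv =>
    match kv.1.toList with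
    | [c] => if PySem.Chars.isalpha c then some (c, (PySem.Int.toStr kv.2).toList) else none
    | _ => none)

def translate_letters_to_digits_alt (input_string : String) (translation_dict : List (String × Int)) : String :=
  let table := pvBTable translation_dict
  String.ofList ((input_string.toList.map (fun c =>
    match table.find? (fun p => p.1 == c) with
    | some p => p.2
    | none => [c])).flatten)

-- ===== PRECONDITION & SPEC =====
def Spec_translate_letters_to_digits (input_string : String) (translation_dict : List (String × Int)) (out : String) : Prop := out = translate_letters_to_digits_alt input_string translation_dict
instance (input_string : String) (translation_dict : List (String × Int)) (out : String) : Decidable (Spec_translate_letters_to_digits input_string translation_dict out) := by unfold Spec_translate_letters_to_digits; infer_instance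

-- ===== CLAIM (what is proved, stated in full; the proofs are below) =====
def Claim_equal_translate_letters_to_digits : Prop := ∀ (input_string : String) (translation_dict : List (String × Int)), Dom_translate_letters_to_digits input_string translation_dict → Spec_translate_letters_to_digits input_string translation_dict (translate_letters_to_digits input_string translation_dict)

-- ===== LEMMAS AND PROOFS =====
-- a string equals the singleton string of c iff its character list is [c]
theorem pvKeyEq (k : String) (c : Char) : (k == String.ofList [c]) = (k.toList == [c]) := by
  rcases h : (k.toList == [c]) with _ | _
  · simp only [beq_eq_false_iff_ne] at h
    simp only [beq_eq_false_iff_ne, ne_eq]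
    intro he
    exact h (by rw [he, String.toList_ofList])
  · simp only [beq_iff_eq] at h
    simp only [beq_iff_eq]
    exact String.toList_inj.mp (by rw [h, String.toList_ofList])

-- unfolding the table on a cons cell
theorem pvBTable_cons (kv : String × Int) (rest : List (String × Int)) :
    pvBTable (kv :: rest)
      = (match (match kv.1.toList with
                | [c] => if PySem.Chars.isalpha c then some (c, (PySem.Int.toStr kv.2).toList) else none
                | _ => none) with
         | some e => e :: pvBTable rest
         | none => pvBTable rest) := by
  rcases hlt : kv.1.toList with _ | ⟨c', tl⟩
  · simp [pvBTable, hlt]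
  · rcases tl with _ | ⟨c'', tl'⟩
    · by_cases ha : PySem.Chars.isalpha c' = true
      · simp [pvBTable, hlt, ha]
      · simp [pvBTable, hlt, ha]
    · simp [pvBTable, hlt]

-- table lookup agrees with A's dict probe, for an alphabetic character
theorem pvTable_find_alpha (d : List (String × Int)) (c : Char) (hc : PySem.Chars.isalpha c = true) :
    (pvBTable d).find? (fun p => p.1 == c)
      = (d.find? (fun kv => kv.1 == String.ofList [c])).map (fun kv => (c, (PySem.Int.toStr kv.2).toList)) := by
  induction d with
  | nil => rfl
  | cons kv rest ih =>
    rw [List.find?_cons, pvKeyEq, pvBTable_cons]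
    rcases hlt : kv.1.toList with _ | ⟨c', tl⟩
    · simp only [hlt]
      have h1 : (([] : List Char) == [c]) = false := by simp
      rw [h1]
      exact ih
    · rcases tl with _ | ⟨c'', tl'⟩
      · simp only [hlt]
        by_cases ha : PySem.Chars.isalpha c' = true
        · rw [if_pos ha]
          by_cases hcc : c' = c
          · subst hcc
            rw [show ([c'] == [c']) = true by simp]
            rw [List.find?_cons]
            simp
          · rw [show ([c'] == [c]) = false by simp [hcc]]
            rw [List.find?_cons, show (c' == c) = false by simp [hcc]]
            exact ih
        · rw [if_neg (by simpa using ha)]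
          have h1 : ([c'] == [c]) = false := by
            simp only [beq_eq_false_iff_ne, ne_eq, List.cons.injEq, and_true]
            intro h
            rw [h] at ha
            exact ha hc
          rw [h1]
          exact ih
      · simp only [hlt]
        rw [show ((c' :: c'' :: tl') == [c]) = false by simp]
        exact ih

-- a non-alphabetic character is never a table key
theorem pvTable_find_nonalpha (d : List (String × Int)) (c : Char) (hc : PySem.Chars.isalpha c = false) :
    (pvBTable d).find? (fun p => p.1 == c) = none := by
  rw [List.find?_eq_none]
  intro p hp
  unfold pvBTable at hp
  rw [List.mem_filterMap] at hp
  obtain ⟨kv, _, hkv⟩ := hp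
  rcases hlt : kv.1.toList with _ | ⟨c', tl⟩
  · simp [hlt] at hkv
  · rcases tl with _ | ⟨c'', tl'⟩
    · simp only [hlt] at hkv
      by_cases ha : PySem.Chars.isalpha c' = true
      · rw [if_pos ha, Option.some.injEq] at hkv
        have hp1 : p.1 = c' := by rw [← hkv]
        rw [hp1]
        intro h
        rw [beq_iff_eq] at h
        rw [h] at ha
        rw [ha] at hc
        exact absurd hc (by simp)
      · rw [if_neg ha] at hkv
        exact absurd hkv (by simp)
    · simp [hlt] at hkv

-- the two per-character transformations agree
theorem pvStep_eq (d : List (String × Int)) (c : Char) :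
    pvAStep d c = (match (pvBTable d).find? (fun p => p.1 == c) with
                   | some p => p.2
                   | none => [c]) := by
  unfold pvAStep
  by_cases hc : PySem.Chars.isalpha c = true
  · rw [if_pos hc, pvTable_find_alpha d c hc]
    cases d.find? (fun kv => kv.1 == String.ofList [c]) <;> rfl
  · rw [if_neg hc, pvTable_find_nonalpha d c (by simpa using hc)]

-- ===== VERDICT (by name: the statement is the Claim_ definition above) =====
theorem translate_letters_to_digits_spec : Claim_equal_translate_letters_to_digits := by
  intro s d _
  unfold Spec_translate_letters_to_digits translate_letters_to_digits translate_letters_to_digits_alt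
  rw [PySem.List.foldl_append_eq_flatMap]
  simp only [List.nil_append, List.flatMap_def]
  congr 1
  congr 1
  exact List.map_congr_left (fun c _ => pvStep_eq d c)
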